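-- pv_equiv track=rewrite | github.com/skondrashov/thisminute | src/reliefweb.py | _human_interest_from_title
-- ===== SOURCE A (Python) =====
-- def _human_interest_from_title(title):
--     """Estimate human interest from title keywords."""
--     title_lower = title.lower()
--     if any(w in title_lower for w in ["emergency", "catastroph", "crisis", "death"]):
--         return 7
--     if any(w in title_lower for w in ["severe", "major", "deadly", "conflict"]):
--         return 6
--     if any(w in title_lower for w in ["flood", "earthquake", "cyclone", "epidemic"]):
--         return 5
--     return 4
-- ===== SOURCE B (Python) =====
-- _KEYWORD_SCORES = [
--     ("emergency", 7), ("catastroph", 7), ("crisis", 7), ("death", 7),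
--     ("severe", 6), ("major", 6), ("deadly", 6), ("conflict", 6),
--     ("flood", 5), ("earthquake", 5), ("cyclone", 5), ("epidemic", 5),
-- ]
--
-- def _human_interest_from_title(title):
--     """Estimate human interest from title keywords."""
--     title_lower = title.lower()
--     return max((score for word, score in _KEYWORD_SCORES if word in title_lower),
--                default=4)
-- ===== Notes on version B (the rewrite author's own statement) =====
-- stated objective: simpler
-- what changed: Replaces the ordered early-return if-cascade with a single (keyword, score) table and one gather-then-max pass with default 4; equivalent because A checks buckets in strictly descending score order.
import Mathlib
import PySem

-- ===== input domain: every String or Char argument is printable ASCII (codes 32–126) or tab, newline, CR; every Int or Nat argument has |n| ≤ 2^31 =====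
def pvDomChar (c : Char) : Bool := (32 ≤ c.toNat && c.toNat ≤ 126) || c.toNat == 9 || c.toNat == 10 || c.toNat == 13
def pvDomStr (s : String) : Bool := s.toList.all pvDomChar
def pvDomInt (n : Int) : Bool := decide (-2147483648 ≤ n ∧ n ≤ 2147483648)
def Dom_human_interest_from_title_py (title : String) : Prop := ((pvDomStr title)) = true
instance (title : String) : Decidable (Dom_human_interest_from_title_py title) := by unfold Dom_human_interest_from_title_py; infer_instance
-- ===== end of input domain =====

-- B replaces A's ordered early-return if-cascade with a (keyword, score) table and one gather-then-max pass (objective: simpler).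

-- ===== PORT A =====
def human_interest_from_title_py (title : String) : Int :=
  let title_lower := PySem.Str.lower title
  if (["emergency", "catastroph", "crisis", "death"].any fun w => PySem.Str.isIn w title_lower) then 7
  else if (["severe", "major", "deadly", "conflict"].any fun w => PySem.Str.isIn w title_lower) then 6
  else if (["flood", "earthquake", "cyclone", "epidemic"].any fun w => PySem.Str.isIn w title_lower) then 5
  else 4

-- ===== PORT B =====
def keywordScores : List (String × Int) :=
  [("emergency", 7), ("catastroph", 7), ("crisis", 7), ("death", 7),
   ("severe", 6), ("major", 6), ("deadly", 6), ("conflict", 6),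
   ("flood", 5), ("earthquake", 5), ("cyclone", 5), ("epidemic", 5)]

def human_interest_from_title_py_alt (title : String) : Int :=
  let title_lower := PySem.Str.lower title
  -- max(... , default=4): fold max over the matching scores, seeded with the default 4
  (keywordScores.filterMap fun p => if PySem.Str.isIn p.1 title_lower then some p.2 else none).foldl max 4

-- ===== PRECONDITION & SPEC =====
def Spec_human_interest_from_title_py (title : String) (out : Int) : Prop := out = human_interest_from_title_py_alt title
instance (title : String) (out : Int) : Decidable (Spec_human_interest_from_title_py title out) := by unfold Spec_human_interest_from_title_py; infer_instance

-- ===== CLAIM (what is proved, stated in full; the proofs are below) =====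
def Claim_equal_human_interest_from_title_py : Prop := ∀ (title : String), Dom_human_interest_from_title_py title → Spec_human_interest_from_title_py title (human_interest_from_title_py title)

-- ===== LEMMAS AND PROOFS =====

-- pull one table entry out of the filterMap as an (empty or singleton) appended block
theorem fm_cons (t w : String) (v : Int) (l : List (String × Int)) :
    (((w, v) :: l).filterMap fun p => if PySem.Str.isIn p.1 t then some p.2 else none)
    = (if PySem.Str.isIn w t then [v] else [])
      ++ (l.filterMap fun p => if PySem.Str.isIn p.1 t then some p.2 else none) := by
  cases h : PySem.Chars.isIn w.toList t.toList <;> simp [PySem.Str.isIn, h]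

-- both programs depend only on the 12 substring tests; with those abstracted as Booleans the equality is decidable
theorem casc_eq_fold (b1 b2 b3 b4 b5 b6 b7 b8 b9 b10 b11 b12 : Bool) :
    (if (b1 || (b2 || (b3 || (b4 || false)))) then (7 : Int)
     else if (b5 || (b6 || (b7 || (b8 || false)))) then 6
     else if (b9 || (b10 || (b11 || (b12 || false)))) then 5
     else 4)
    = (((if b1 then [(7:Int)] else []) ++ ((if b2 then [(7:Int)] else []) ++ ((if b3 then [(7:Int)] else []) ++ ((if b4 then [(7:Int)] else []) ++ ((if b5 then [(6:Int)] else []) ++ ((if b6 then [(6:Int)] else []) ++ ((if b7 then [(6:Int)] else []) ++ ((if b8 then [(6:Int)] else []) ++ ((if b9 then [(5:Int)] else []) ++ ((if b10 then [(5:Int)] else []) ++ ((if b11 then [(5:Int)] else []) ++ ((if b12 then [(5:Int)] else []) ++ ([] : List Int))))))))))))).foldl max 4) := by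
  cases b1 <;> cases b2 <;> cases b3 <;> cases b4 <;> cases b5 <;> cases b6 <;>
    cases b7 <;> cases b8 <;> cases b9 <;> cases b10 <;> cases b11 <;> cases b12 <;> decide

-- ===== VERDICT (by name: the statement is the Claim_ definition above) =====
theorem human_interest_from_title_py_spec : Claim_equal_human_interest_from_title_py := by
  intro title _
  unfold Spec_human_interest_from_title_py
  simp only [human_interest_from_title_py, human_interest_from_title_py_alt, keywordScores,
    List.any_cons, List.any_nil, fm_cons, List.filterMap_nil]
  exact casc_eq_fold _ _ _ _ _ _ _ _ _ _ _ _
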